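-- pv_equiv track=rewrite | github.com/jtlinna/advent-of-code-2025 | 01-secret-entrance/01-secret-entrance.py | count_dial_at_zero_after_or_during_rotations
-- ===== SOURCE A (Python) =====
-- def count_dial_at_zero_after_or_during_rotations(start, input):
--     dial = start
--     counter = 0
--     for value in input:
--         for _ in range(abs(value)):
--             step = 1 if value > 0 else -1
--             dial = (dial + step + 100) % 100
--             if dial == 0: counter += 1
--     return counter
-- ===== SOURCE B (Python) =====
-- def count_dial_at_zero_after_or_during_rotations(start, input):
--     dial = start % 100
--     counter = 0
--     for value in input:
--         if value > 0:
--             counter += (value + dial) // 100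
--         else:
--             counter += (-value + (-dial) % 100) // 100
--         dial = (dial + value) % 100
--     return counter
-- ===== Notes on version B (the rewrite author's own statement) =====
-- stated objective: faster
-- what changed: Replaces the per-unit-step inner simulation loop with a closed-form modular count of zero crossings per rotation value, updating the dial directly by (dial+value)%100.
import Mathlib
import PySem

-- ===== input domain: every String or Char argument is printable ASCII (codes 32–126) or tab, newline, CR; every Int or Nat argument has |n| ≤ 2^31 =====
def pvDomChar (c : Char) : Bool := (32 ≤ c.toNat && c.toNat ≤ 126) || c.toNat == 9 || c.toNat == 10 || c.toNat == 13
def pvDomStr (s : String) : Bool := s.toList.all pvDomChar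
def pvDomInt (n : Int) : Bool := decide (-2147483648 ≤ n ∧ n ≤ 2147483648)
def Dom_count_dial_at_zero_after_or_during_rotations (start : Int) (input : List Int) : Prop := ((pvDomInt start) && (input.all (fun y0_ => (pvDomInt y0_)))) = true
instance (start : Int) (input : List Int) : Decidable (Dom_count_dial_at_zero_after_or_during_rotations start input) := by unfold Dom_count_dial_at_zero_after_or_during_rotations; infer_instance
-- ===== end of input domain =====

-- B replaces A's per-unit-step inner simulation with a closed-form modular count per
-- rotation value (asymptotically faster: O(n) instead of O(sum |value|)).

-- ===== PORT A =====
-- inner loop: 'for _ in range(abs(value)): step = …; dial = (dial+step+100)%100; if dial == 0: counter += 1'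
def pvInnerA (value : Int) : Nat → Int × Int → Int × Int
  | 0, st => st
  | Nat.succ n, st =>
    let step : Int := if value > 0 then 1 else -1
    let dial := PySem.Int.mod (st.1 + step + 100) 100
    pvInnerA value n (dial, if dial = 0 then st.2 + 1 else st.2)

def count_dial_at_zero_after_or_during_rotations (start : Int) (input : List Int) : Int :=
  (input.foldl (fun st value => pvInnerA value value.natAbs st) (start, 0)).2

-- ===== PORT B =====
def count_dial_at_zero_after_or_during_rotations_alt (start : Int) (input : List Int) : Int :=
  (input.foldl (fun st value =>
      let counter :=
        if value > 0 then st.2 + PySem.Int.floordiv (value + st.1) 100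
        else st.2 + PySem.Int.floordiv (-value + PySem.Int.mod (-st.1) 100) 100
      (PySem.Int.mod (st.1 + value) 100, counter))
    (PySem.Int.mod start 100, 0)).2

-- ===== PRECONDITION & SPEC =====
def Spec_count_dial_at_zero_after_or_during_rotations (start : Int) (input : List Int) (out : Int) : Prop := out = count_dial_at_zero_after_or_during_rotations_alt start input
instance (start : Int) (input : List Int) (out : Int) : Decidable (Spec_count_dial_at_zero_after_or_during_rotations start input out) := by unfold Spec_count_dial_at_zero_after_or_during_rotations; infer_instance

-- ===== CLAIM (what is proved, stated in full; the proofs are below) =====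
def Claim_equal_count_dial_at_zero_after_or_during_rotations : Prop := ∀ (start : Int) (input : List Int), Dom_count_dial_at_zero_after_or_during_rotations start input → Spec_count_dial_at_zero_after_or_during_rotations start input (count_dial_at_zero_after_or_during_rotations start input)

-- ===== LEMMAS AND PROOFS =====

-- closed form for the inner loop when the value is positive and the dial is normalized
theorem pvInnerA_up (v : Int) (hv : v > 0) : ∀ (n : Nat) (d c : Int), 0 ≤ d → d < 100 →
    pvInnerA v n (d, c) = (PySem.Int.mod (d + n) 100, c + PySem.Int.floordiv ((n : Int) + d) 100) := by
  intro n
  induction n with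
  | zero =>
    intro d c h0 h1
    simp only [pvInnerA, PySem.Int.mod_eq_emod_of_pos (by norm_num : (0:Int) < 100),
      PySem.Int.floordiv_eq_ediv_of_pos (by norm_num : (0:Int) < 100), Prod.mk.injEq]
    constructor <;> omega
  | succ n ih =>
    intro d c h0 h1
    simp only [pvInnerA, hv, if_pos]
    rw [ih]
    · simp only [PySem.Int.mod_eq_emod_of_pos (by norm_num : (0:Int) < 100),
        PySem.Int.floordiv_eq_ediv_of_pos (by norm_num : (0:Int) < 100)]
      by_cases he : (d + 1 + 100) % 100 = 0 <;>
        simp only [he, if_pos, if_neg, if_false, Prod.mk.injEq] <;>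
        constructor <;> push_cast <;> omega
    · exact PySem.Int.mod_nonneg _ (by norm_num)
    · exact PySem.Int.mod_lt _ (by norm_num)

-- closed form for the inner loop when the value is non-positive and the dial is normalized
theorem pvInnerA_down (v : Int) (hv : ¬ v > 0) : ∀ (n : Nat) (d c : Int), 0 ≤ d → d < 100 →
    pvInnerA v n (d, c) = (PySem.Int.mod (d - n) 100, c + PySem.Int.floordiv ((n : Int) + PySem.Int.mod (-d) 100) 100) := by
  intro n
  induction n with
  | zero =>
    intro d c h0 h1
    simp only [pvInnerA, PySem.Int.mod_eq_emod_of_pos (by norm_num : (0:Int) < 100),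
      PySem.Int.floordiv_eq_ediv_of_pos (by norm_num : (0:Int) < 100), Prod.mk.injEq]
    constructor <;> omega
  | succ n ih =>
    intro d c h0 h1
    simp only [pvInnerA, hv, if_false]
    rw [ih]
    · simp only [PySem.Int.mod_eq_emod_of_pos (by norm_num : (0:Int) < 100),
        PySem.Int.floordiv_eq_ediv_of_pos (by norm_num : (0:Int) < 100)]
      by_cases he : (d + -1 + 100) % 100 = 0 <;>
        simp only [he, if_pos, if_neg, if_false, Prod.mk.injEq] <;>
        constructor <;> push_cast <;> omega
    · exact PySem.Int.mod_nonneg _ (by norm_num)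
    · exact PySem.Int.mod_lt _ (by norm_num)

-- when at least one step is taken, the inner loop only sees the dial modulo 100
theorem pvInnerA_norm (v : Int) (n : Nat) (d c : Int) :
    pvInnerA v (n + 1) (d, c) = pvInnerA v (n + 1) (PySem.Int.mod d 100, c) := by
  have key : ∀ s : Int, PySem.Int.mod (d + s + 100) 100 = PySem.Int.mod (PySem.Int.mod d 100 + s + 100) 100 := by
    intro s
    simp only [PySem.Int.mod_eq_emod_of_pos (by norm_num : (0:Int) < 100)]
    omega
  simp only [pvInnerA]
  rw [key]

-- the outer loop invariant: B's dial is A's dial modulo 100, counters agree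
theorem pv_fold_eq : ∀ (input : List Int) (dA c : Int),
    (input.foldl (fun st value => pvInnerA value value.natAbs st) (dA, c)).2 =
    (input.foldl (fun st value =>
        let counter :=
          if value > 0 then st.2 + PySem.Int.floordiv (value + st.1) 100
          else st.2 + PySem.Int.floordiv (-value + PySem.Int.mod (-st.1) 100) 100
        (PySem.Int.mod (st.1 + value) 100, counter)) (PySem.Int.mod dA 100, c)).2 := by
  intro input
  induction input with
  | nil => intro dA c; rfl
  | cons v rest ih =>
    intro dA c
    simp only [List.foldl_cons]
    have hm0 : (0:Int) ≤ PySem.Int.mod dA 100 := PySem.Int.mod_nonneg _ (by norm_num)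
    have hm1 : PySem.Int.mod dA 100 < 100 := PySem.Int.mod_lt _ (by norm_num)
    by_cases hv : v > 0
    · -- v > 0 : natAbs v = (natAbs v - 1) + 1
      obtain ⟨m, hm⟩ : ∃ m, v.natAbs = m + 1 := ⟨v.natAbs - 1, by omega⟩
      rw [hm, pvInnerA_norm, ← hm,
        pvInnerA_up v hv v.natAbs (PySem.Int.mod dA 100) c hm0 hm1]
      have hcast : ((v.natAbs : Int)) = v := Int.natAbs_of_nonneg (le_of_lt hv)
      rw [hcast, ih]
      simp only [hv, if_pos]
      have : PySem.Int.mod (PySem.Int.mod (PySem.Int.mod dA 100 + v) 100) 100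
           = PySem.Int.mod (PySem.Int.mod dA 100 + v) 100 := by
        simp only [PySem.Int.mod_eq_emod_of_pos (by norm_num : (0:Int) < 100)]; omega
      rw [this]
    · by_cases hz : v = 0
      · subst hz
        simp only [Int.natAbs_zero, pvInnerA]
        rw [ih]
        have h1 : PySem.Int.mod (PySem.Int.mod dA 100 + 0) 100 = PySem.Int.mod dA 100 := by
          simp only [PySem.Int.mod_eq_emod_of_pos (by norm_num : (0:Int) < 100)]; omega
        have h2 : c + PySem.Int.floordiv (-0 + PySem.Int.mod (-(PySem.Int.mod dA 100)) 100) 100 = c := by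
          simp only [PySem.Int.mod_eq_emod_of_pos (by norm_num : (0:Int) < 100),
            PySem.Int.floordiv_eq_ediv_of_pos (by norm_num : (0:Int) < 100)]
          omega
        simp only [show ¬ (0:Int) > 0 by norm_num, if_false, h1, h2]
      · -- v < 0
        obtain ⟨m, hm⟩ : ∃ m, v.natAbs = m + 1 := ⟨v.natAbs - 1, by omega⟩
        rw [hm, pvInnerA_norm, ← hm,
          pvInnerA_down v hv v.natAbs (PySem.Int.mod dA 100) c hm0 hm1]
        have hcast : ((v.natAbs : Int)) = -v := by omega
        rw [hcast, ih]
        simp only [hv, if_false]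
        have h1 : PySem.Int.mod (PySem.Int.mod dA 100 - -v) 100
            = PySem.Int.mod (PySem.Int.mod dA 100 + v) 100 := by
          simp only [PySem.Int.mod_eq_emod_of_pos (by norm_num : (0:Int) < 100)]; omega
        have h2 : PySem.Int.mod (PySem.Int.mod (PySem.Int.mod dA 100 + v) 100) 100
            = PySem.Int.mod (PySem.Int.mod dA 100 + v) 100 := by
          simp only [PySem.Int.mod_eq_emod_of_pos (by norm_num : (0:Int) < 100)]; omega
        rw [h1, h2]

-- ===== VERDICT (by name: the statement is the Claim_ definition above) =====
theorem count_dial_at_zero_after_or_during_rotations_spec : Claim_equal_count_dial_at_zero_after_or_during_rotations := by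
  intro start input _
  unfold Spec_count_dial_at_zero_after_or_during_rotations
  unfold count_dial_at_zero_after_or_during_rotations count_dial_at_zero_after_or_during_rotations_alt
  exact pv_fold_eq input start 0
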